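-- pv_equiv track=rewrite | github.com/komodorio/helm-charts | .buildkite/release_checks/pipeline/generate.py | find_rc_versions_after_last_ga
-- ===== SOURCE A (Python) =====
-- def find_rc_versions_after_last_ga(tags, last_ga):
--     rc_versions = []
--     found_last_ga = False
--     for tag in tags:
--         if tag == last_ga:
--             found_last_ga = True
--         elif found_last_ga and '+rc' in tag.lower():
--             rc_versions.append(tag)
--     return rc_versions
-- ===== SOURCE B (Python) =====
-- def find_rc_versions_after_last_ga(tags, last_ga):
--     if last_ga not in tags:
--         return []
--     idx = tags.index(last_ga)
--     return [t for t in tags[idx + 1:] if t != last_ga and '+rc' in t.lower()]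
-- ===== Notes on version B (the rewrite author's own statement) =====
-- stated objective: simpler
-- what changed: Replaces the boolean-flag single pass with a locate-then-filter decomposition: find the first occurrence of last_ga, then filter the suffix slice for '+rc' tags (still excluding repeats of last_ga).
import Mathlib
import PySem

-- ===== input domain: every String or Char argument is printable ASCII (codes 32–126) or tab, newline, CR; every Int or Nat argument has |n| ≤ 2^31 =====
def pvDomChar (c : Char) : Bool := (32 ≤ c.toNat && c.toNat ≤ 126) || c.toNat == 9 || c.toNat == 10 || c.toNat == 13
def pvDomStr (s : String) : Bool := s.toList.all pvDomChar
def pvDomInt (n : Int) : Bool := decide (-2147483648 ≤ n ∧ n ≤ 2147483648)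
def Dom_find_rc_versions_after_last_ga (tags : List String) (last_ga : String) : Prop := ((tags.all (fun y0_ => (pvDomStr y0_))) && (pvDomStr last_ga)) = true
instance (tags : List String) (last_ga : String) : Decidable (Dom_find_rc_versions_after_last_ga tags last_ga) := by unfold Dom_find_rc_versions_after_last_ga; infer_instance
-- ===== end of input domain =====

-- B replaces A's boolean-flag single pass by locate-then-filter (index of last_ga, then filter its suffix); objective: simpler.

-- ===== PORT A =====
def find_rc_versions_after_last_ga (tags : List String) (last_ga : String) : List String :=
  (tags.foldl
    (fun (st : List String × Bool) tag =>
      if tag == last_ga then (st.1, true)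
      else if st.2 && PySem.Str.isIn "+rc" (PySem.Str.lower tag) then (st.1 ++ [tag], st.2)
      else st)
    ([], false)).1

-- ===== PORT B =====
def find_rc_versions_after_last_ga_alt (tags : List String) (last_ga : String) : List String :=
  if last_ga ∈ tags then
    let idx := (PySem.List.index? tags last_ga).getD 0
    (PySem.List.slice tags (some ((idx : Int) + 1)) none).filter
      (fun t => t ≠ last_ga && PySem.Str.isIn "+rc" (PySem.Str.lower t))
  else []

-- ===== PRECONDITION & SPEC =====
def Spec_find_rc_versions_after_last_ga (tags : List String) (last_ga : String) (out : List String) : Prop := out = find_rc_versions_after_last_ga_alt tags last_ga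
instance (tags : List String) (last_ga : String) (out : List String) : Decidable (Spec_find_rc_versions_after_last_ga tags last_ga out) := by unfold Spec_find_rc_versions_after_last_ga; infer_instance

-- ===== CLAIM (what is proved, stated in full; the proofs are below) =====
def Claim_equal_find_rc_versions_after_last_ga : Prop := ∀ (tags : List String) (last_ga : String), Dom_find_rc_versions_after_last_ga tags last_ga → Spec_find_rc_versions_after_last_ga tags last_ga (find_rc_versions_after_last_ga tags last_ga)

-- ===== LEMMAS AND PROOFS =====

-- the loop body of A and the filter predicate of B, as abbreviations for the proofs
def pvStep (last_ga : String) (st : List String × Bool) (tag : String) : List String × Bool :=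
  if tag == last_ga then (st.1, true)
  else if st.2 && PySem.Str.isIn "+rc" (PySem.Str.lower tag) then (st.1 ++ [tag], st.2)
  else st

def pvKeep (last_ga : String) (t : String) : Bool :=
  t ≠ last_ga && PySem.Str.isIn "+rc" (PySem.Str.lower t)

-- once the flag is true, the rest of A's loop is exactly B's filter
theorem pv_found (last_ga : String) (tags acc : List String) :
    (tags.foldl (pvStep last_ga) (acc, true)).1 = acc ++ tags.filter (pvKeep last_ga) := by
  induction tags generalizing acc with
  | nil => simp
  | cons t ts ih =>
    by_cases h : t = last_ga
    · simp [pvStep, pvKeep, h, ih]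
    · by_cases hrc : PySem.Chars.isIn ['+', 'r', 'c'] (PySem.Chars.lower t.toList) = true
      · simp [pvStep, pvKeep, h, hrc, ih]
      · simp [pvStep, pvKeep, h, hrc, ih]

-- before the flag is set, A collects nothing until the first occurrence of last_ga
theorem pv_notfound (last_ga : String) (tags acc : List String) :
    (tags.foldl (pvStep last_ga) (acc, false)).1 =
      acc ++ (match PySem.List.index? tags last_ga with
              | none => []
              | some k => (tags.drop (k + 1)).filter (pvKeep last_ga)) := by
  induction tags generalizing acc with
  | nil => simp [PySem.List.index?]
  | cons t ts ih =>
    by_cases h : t = last_ga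
    · subst h
      rw [PySem.List.index?_cons_self]
      simpa [pvStep] using pv_found t ts acc
    · rw [PySem.List.index?_cons_of_ne ts h]
      have hstep : pvStep last_ga (acc, false) t = (acc, false) := by
        simp [pvStep, h]
      rw [List.foldl_cons, hstep, ih]
      cases PySem.List.index? ts last_ga with
      | none => simp
      | some k => simp

-- ===== VERDICT (by name: the statement is the Claim_ definition above) =====
theorem find_rc_versions_after_last_ga_spec : Claim_equal_find_rc_versions_after_last_ga := by
  intro tags last_ga _
  show (List.foldl (pvStep last_ga) ([], false) tags).1 = find_rc_versions_after_last_ga_alt tags last_ga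
  rw [pv_notfound]
  by_cases hmem : last_ga ∈ tags
  · obtain ⟨k, hk⟩ := Option.isSome_iff_exists.mp ((PySem.List.index?_isSome_iff tags last_ga).mpr hmem)
    have hslice : PySem.List.slice tags (some ((k : Int) + 1)) none = tags.drop (k + 1) := by
      simpa using PySem.List.slice_from_natCast tags (k + 1)
    rw [hk]
    simp only [find_rc_versions_after_last_ga_alt, if_pos hmem, PySem.List.index?_eq_idxOf?] at *
    rw [hk]
    simp only [Option.getD_some, List.nil_append]
    rw [hslice]
    unfold pvKeep
    simp
  · have hk := (PySem.List.index?_eq_none_iff tags last_ga).mpr hmem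
    rw [hk]
    simp [find_rc_versions_after_last_ga_alt, hmem]
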